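-- pv_equiv track=rewrite | github.com/majdabd/TrialMatchAI | src/entity_recognition.py | _find_and_remove_overlaps
-- ===== SOURCE A (Python) =====
-- def _find_and_remove_overlaps(dictionary_list, if_overlap_keep):
--     # Create a dictionary to store non-overlapping entries
--     non_overlapping = {}
--     # Create a set of entity groups to keep
--     preferred_set = set(if_overlap_keep)
--
--     # Iterate through the input list
--     for entry in dictionary_list:
--         text = entry['text']
--         group = entry['entity_group']
--
--         # Check if the text is already in the non_overlapping dictionary
--         if text in non_overlapping:
--             # Compare groups and keep the entry if it belongs to one of the preferred groups
--             if group in preferred_set: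
--                 non_overlapping[text] = entry
--         else:
--             non_overlapping[text] = entry
--
--     # Convert the non-overlapping dictionary back to a list
--     result_list = list(non_overlapping.values())
--
--     return result_list
-- ===== SOURCE B (Python) =====
-- def _find_and_remove_overlaps(dictionary_list, if_overlap_keep):
--     preferred = set(if_overlap_keep)
--     # First pass: group entries by text, in first-occurrence order.
--     groups = {}
--     for entry in dictionary_list:
--         groups.setdefault(entry['text'], []).append(entry)
--     # Second pass: per group keep the last preferred entry, else the first one.
--     result = []
--     for entries in groups.values():
--         winner = entries[0]
--         for e in entries:
--             if e['entity_group'] in preferred: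
--                 winner = e
--         result.append(winner)
--     return result
-- ===== Notes on version B (the rewrite author's own statement) =====
-- stated objective: alternative
-- what changed: A keeps a single text-to-winner dict updated in one pass; B first groups all entries by text into an insertion-ordered dict of lists and then selects each group's winner (last preferred entry, else the first) in a second pass.
import Mathlib
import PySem

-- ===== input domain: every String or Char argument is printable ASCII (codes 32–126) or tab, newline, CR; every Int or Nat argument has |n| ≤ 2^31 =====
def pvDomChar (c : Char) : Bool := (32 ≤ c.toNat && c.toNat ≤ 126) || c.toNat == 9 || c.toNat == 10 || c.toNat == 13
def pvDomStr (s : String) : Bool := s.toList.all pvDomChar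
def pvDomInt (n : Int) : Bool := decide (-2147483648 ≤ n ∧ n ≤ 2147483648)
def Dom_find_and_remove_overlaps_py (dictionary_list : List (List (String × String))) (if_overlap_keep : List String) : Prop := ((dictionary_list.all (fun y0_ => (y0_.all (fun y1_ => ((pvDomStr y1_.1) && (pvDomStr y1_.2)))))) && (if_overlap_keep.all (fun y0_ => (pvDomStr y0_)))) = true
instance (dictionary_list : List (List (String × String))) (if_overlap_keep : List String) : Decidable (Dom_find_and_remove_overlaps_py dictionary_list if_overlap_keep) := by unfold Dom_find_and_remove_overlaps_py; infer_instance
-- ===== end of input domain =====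

-- B replaces A's single winner-overwriting dict pass by a group-by-text pass followed by a
-- per-group winner selection (last preferred entry, else the first); same return value, different decomposition.

-- ===== PORT A =====
-- entry[k] for a Python dict passed as an assoc list (Python dict construction: last value wins).
-- Pre_ guarantees the key is present, so the "" default is never used on admitted inputs
-- (Python raises KeyError there).
def pvEntryGet (entry : List (String × String)) (k : String) : String :=
  ((PySem.Dict.ofList entry).get? k).getD ""

-- the body of A's loop
def pvStepA (preferred : PySem.Set String)
    (d : PySem.Dict String (List (String × String))) (entry : List (String × String)) :
    PySem.Dict String (List (String × String)) :=
  let text := pvEntryGet entry "text"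
  let group := pvEntryGet entry "entity_group"
  if d.contains text then
    if PySem.Set.contains preferred group then d.insert text entry else d
  else d.insert text entry

def find_and_remove_overlaps_py (dictionary_list : List (List (String × String))) (if_overlap_keep : List String) : List (List (String × String)) :=
  let preferred : PySem.Set String := PySem.Set.ofList if_overlap_keep
  let non_overlapping := dictionary_list.foldl (pvStepA preferred) PySem.Dict.empty
  non_overlapping.values

-- ===== PORT B =====
-- body of B's grouping loop: groups.setdefault(entry['text'], []).append(entry)
def pvGroupStep (d : PySem.Dict String (List (List (String × String))))
    (entry : List (String × String)) : PySem.Dict String (List (List (String × String))) :=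
  d.modify (pvEntryGet entry "text") [] (· ++ [entry])

-- B's second pass on one group: winner = entries[0]; every preferred entry overwrites it
def pvPickWinner (preferred : PySem.Set String) (entries : List (List (String × String))) :
    List (String × String) :=
  entries.foldl
    (fun w e => if PySem.Set.contains preferred (pvEntryGet e "entity_group") then e else w)
    (entries.headD [])

def find_and_remove_overlaps_py_alt (dictionary_list : List (List (String × String))) (if_overlap_keep : List String) : List (List (String × String)) :=
  let preferred : PySem.Set String := PySem.Set.ofList if_overlap_keep
  let groups := dictionary_list.foldl pvGroupStep PySem.Dict.empty
  (groups.values).map (pvPickWinner preferred)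

-- ===== PRECONDITION & SPEC =====
-- Pre_ excludes exactly the inputs on which A raises KeyError: an entry without a
-- 'text' or an 'entity_group' key.
def Pre_find_and_remove_overlaps_py (dictionary_list : List (List (String × String))) (if_overlap_keep : List String) : Prop :=
  ∀ e ∈ dictionary_list, "text" ∈ e.map Prod.fst ∧ "entity_group" ∈ e.map Prod.fst
instance (dictionary_list : List (List (String × String))) (if_overlap_keep : List String) : Decidable (Pre_find_and_remove_overlaps_py dictionary_list if_overlap_keep) := by unfold Pre_find_and_remove_overlaps_py; infer_instance

def pvWitness_find_and_remove_overlaps_py : (List (List (String × String))) × List String :=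
  ([[("text", "aspirin"), ("entity_group", "Drug")],
    [("text", "aspirin"), ("entity_group", "Chemical")]], ["Chemical"])

def Spec_find_and_remove_overlaps_py (dictionary_list : List (List (String × String))) (if_overlap_keep : List String) (out : List (List (String × String))) : Prop := out = find_and_remove_overlaps_py_alt dictionary_list if_overlap_keep
instance (dictionary_list : List (List (String × String))) (if_overlap_keep : List String) (out : List (List (String × String))) : Decidable (Spec_find_and_remove_overlaps_py dictionary_list if_overlap_keep out) := by unfold Spec_find_and_remove_overlaps_py; infer_instance

-- ===== CLAIM (what is proved, stated in full; the proofs are below) =====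
def Claim_equal_find_and_remove_overlaps_py : Prop := ∀ (dictionary_list : List (List (String × String))) (if_overlap_keep : List String), Dom_find_and_remove_overlaps_py dictionary_list if_overlap_keep → Pre_find_and_remove_overlaps_py dictionary_list if_overlap_keep → Spec_find_and_remove_overlaps_py dictionary_list if_overlap_keep (find_and_remove_overlaps_py dictionary_list if_overlap_keep)

-- ===== LEMMAS AND PROOFS =====

-- appending a preferred entry to a group makes it the winner
lemma pick_append_pref (pref : PySem.Set String) (g : List (List (String × String)))
    (e : List (String × String))
    (h : PySem.Set.contains pref (pvEntryGet e "entity_group") = true) :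
    pvPickWinner pref (g ++ [e]) = e := by
  have h' : pvEntryGet e "entity_group" ∈ pref := by simpa using h
  simp [pvPickWinner, List.foldl_append, h']

-- appending a non-preferred entry to a nonempty group keeps its winner
lemma pick_append_nonpref (pref : PySem.Set String) (g : List (List (String × String)))
    (e : List (String × String)) (hg : g ≠ [])
    (h : PySem.Set.contains pref (pvEntryGet e "entity_group") = false) :
    pvPickWinner pref (g ++ [e]) = pvPickWinner pref g := by
  have h' : pvEntryGet e "entity_group" ∉ pref := by
    simpa using h
  cases g with
  | nil => exact absurd rfl hg
  | cons x xs => simp [pvPickWinner, List.foldl_append, h']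

lemma pick_singleton (pref : PySem.Set String) (e : List (String × String)) :
    pvPickWinner pref [e] = e := by
  simp [pvPickWinner]

-- the two dicts have the same keys, hence the same 'contains'
lemma contains_of_rel (pref : PySem.Set String)
    (dA : PySem.Dict String (List (String × String)))
    (dB : PySem.Dict String (List (List (String × String))))
    (h : dA.items = dB.items.map (fun p => (p.1, pvPickWinner pref p.2))) (t : String) :
    dA.contains t = dB.contains t := by
  simp [PySem.Dict.contains, h, List.any_map, Function.comp_def]

-- the loop invariant: A's dict is B's group dict with each group replaced by its winner
lemma loop_inv (pref : PySem.Set String) (dl : List (List (String × String)))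
    (dA : PySem.Dict String (List (String × String)))
    (dB : PySem.Dict String (List (List (String × String))))
    (hnd : dB.keys.Nodup)
    (hne : ∀ p ∈ dB.items, p.2 ≠ [])
    (h : dA.items = dB.items.map (fun p => (p.1, pvPickWinner pref p.2))) :
    (dl.foldl (pvStepA pref) dA).items
      = ((dl.foldl pvGroupStep dB).items).map (fun p => (p.1, pvPickWinner pref p.2)) := by
  induction dl generalizing dA dB with
  | nil => exact h
  | cons e tl ih =>
    simp only [List.foldl_cons]
    have hcon := contains_of_rel pref dA dB h (pvEntryGet e "text")
    cases hc : dB.contains (pvEntryGet e "text") with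
    | true =>
      have hA : dA.contains (pvEntryGet e "text") = true := hcon.trans hc
      obtain ⟨g, hg⟩ : ∃ g, (pvEntryGet e "text", g) ∈ dB.items := by
        obtain ⟨p, hp, hpt⟩ := List.any_eq_true.mp hc
        exact ⟨p.2, by rwa [show pvEntryGet e "text" = p.1 from (eq_of_beq hpt).symm]⟩
      have hgD : dB.getD (pvEntryGet e "text") [] = g :=
        PySem.Dict.getD_of_mem_items dB hg hnd []
      have hBstep : pvGroupStep dB e = dB.insert (pvEntryGet e "text") (g ++ [e]) := by
        simp [pvGroupStep, PySem.Dict.modify, hgD]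
      have hgne : g ≠ [] := hne _ hg
      have hnd' : (dB.insert (pvEntryGet e "text") (g ++ [e])).keys.Nodup := by
        rw [PySem.Dict.keys_insert_of_contains _ _ hc]; exact hnd
      have hne' : ∀ p ∈ (dB.insert (pvEntryGet e "text") (g ++ [e])).items, p.2 ≠ [] := by
        intro p hp
        rcases (PySem.Dict.mem_items_insert _ _ _ _).mp hp with h1 | ⟨h2, _⟩
        · simp [h1]
        · exact hne _ h2
      rw [hBstep]
      cases hpref : PySem.Set.contains pref (pvEntryGet e "entity_group") with
      | true =>
        have hm : pvEntryGet e "entity_group" ∈ pref := by simpa using hpref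
        have hAstep : pvStepA pref dA e = dA.insert (pvEntryGet e "text") e := by
          simp [pvStepA, hA, hm]
        rw [hAstep]
        refine ih _ _ hnd' hne' ?_
        rw [PySem.Dict.items_insert_of_contains _ _ hA,
            PySem.Dict.items_insert_of_contains _ _ hc, h, List.map_map, List.map_map]
        apply List.map_congr_left
        intro p hp
        by_cases hpt : p.1 = pvEntryGet e "text"
        · simp [hpt, pick_append_pref pref g e hpref]
        · simp [hpt]
      | false =>
        have hm : pvEntryGet e "entity_group" ∉ pref := by simpa using hpref
        have hAstep : pvStepA pref dA e = dA := by
          simp [pvStepA, hA, hm]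
        rw [hAstep]
        refine ih _ _ hnd' hne' ?_
        rw [PySem.Dict.items_insert_of_contains _ _ hc, h, List.map_map]
        apply List.map_congr_left
        intro p hp
        by_cases hpt : p.1 = pvEntryGet e "text"
        · have hp2 : p.2 = g := by
            have := PySem.Dict.getD_of_mem_items dB (hpt ▸ (show (p.1, p.2) ∈ dB.items from hp)) hnd []
            rw [hgD] at this; exact this.symm
          simp [hpt, hp2,
            pick_append_nonpref pref g e hgne hpref]
        · simp [hpt]
    | false =>
      have hA : dA.contains (pvEntryGet e "text") = false := hcon.trans hc
      have hBstep : pvGroupStep dB e = dB.insert (pvEntryGet e "text") [e] := by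
        simp [pvGroupStep, PySem.Dict.modify, PySem.Dict.getD_of_not_contains dB [] hc]
      have hAstep : pvStepA pref dA e = dA.insert (pvEntryGet e "text") e := by
        simp [pvStepA, hA]
      have hnd' : (dB.insert (pvEntryGet e "text") [e]).keys.Nodup := by
        rw [PySem.Dict.keys_insert_of_not_contains _ _ hc]
        refine List.nodup_append.mpr ⟨hnd, List.nodup_singleton _, ?_⟩
        intro a ha b hb
        rw [List.mem_singleton] at hb
        subst hb
        intro hab
        subst hab
        have : dB.contains (pvEntryGet e "text") = true := by
          rw [PySem.Dict.contains_iff_mem_keys]; exact ha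
        simp [hc] at this
      have hne' : ∀ p ∈ (dB.insert (pvEntryGet e "text") [e]).items, p.2 ≠ [] := by
        intro p hp
        rw [PySem.Dict.items_insert_of_not_contains _ _ hc] at hp
        rcases List.mem_append.mp hp with h1 | h2
        · exact hne _ h1
        · simp [List.mem_singleton.mp h2]
      rw [hAstep, hBstep]
      refine ih _ _ hnd' hne' ?_
      rw [PySem.Dict.items_insert_of_not_contains _ _ hA,
          PySem.Dict.items_insert_of_not_contains _ _ hc, List.map_append, h]
      simp [pick_singleton]

theorem find_and_remove_overlaps_py_spec_aux (dictionary_list : List (List (String × String)))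
    (if_overlap_keep : List String) :
    find_and_remove_overlaps_py dictionary_list if_overlap_keep
      = find_and_remove_overlaps_py_alt dictionary_list if_overlap_keep := by
  have h := loop_inv (PySem.Set.ofList if_overlap_keep) dictionary_list
    PySem.Dict.empty PySem.Dict.empty (by simp [PySem.Dict.empty, PySem.Dict.keys])
    (by simp [PySem.Dict.empty]) (by simp [PySem.Dict.empty])
  simp [find_and_remove_overlaps_py, find_and_remove_overlaps_py_alt, PySem.Dict.values, h,
    List.map_map, Function.comp]

-- ===== VERDICT (by name: the statement is the Claim_ definition above) =====
theorem find_and_remove_overlaps_py_spec : Claim_equal_find_and_remove_overlaps_py := by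
  intro dl keep _ _
  exact find_and_remove_overlaps_py_spec_aux dl keep
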